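-- pv_equiv track=rewrite | github.com/dannySubsense/PineScript-Builder | src/tradingview_ingest/discovery.py | choose_reference_assets
-- ===== SOURCE A (Python) =====
-- def choose_reference_assets(sources: list[str]) -> list[str]:
--     scored: list[tuple[int, str]] = []
--     for src in sources:
--         score = 0
--         lower = src.lower()
--         if "pine_script_reference" in lower:
--             score += 10
--         if "reference" in lower:
--             score += 5
--         if "pine" in lower:
--             score += 3
--         if score > 0:
--             scored.append((score, src))
--     if scored:
--         top_score = max(score for score, _ in scored)
--         return sorted({src for score, src in scored if score == top_score})
--     return sorted(set(sources))
-- ===== SOURCE B (Python) =====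
-- def choose_reference_assets(sources: list[str]) -> list[str]:
--     best = 0
--     best_set: set[str] = set()
--     for src in sources:
--         lower = src.lower()
--         s = (10 if "pine_script_reference" in lower else 0) \
--             + (5 if "reference" in lower else 0) \
--             + (3 if "pine" in lower else 0)
--         if s > best:
--             best = s
--             best_set = {src}
--         elif s == best and s > 0:
--             best_set.add(src)
--     if best_set:
--         return sorted(best_set)
--     return sorted(set(sources))
-- ===== Notes on version B (the rewrite author's own statement) =====
-- stated objective: alternative
-- what changed: Instead of materializing the full scored list, taking max over it and filtering for the top score, B keeps a running best score and the set of its achievers in one pass, falling back to sorted(set(sources)) only when nothing scored.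
import Mathlib
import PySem

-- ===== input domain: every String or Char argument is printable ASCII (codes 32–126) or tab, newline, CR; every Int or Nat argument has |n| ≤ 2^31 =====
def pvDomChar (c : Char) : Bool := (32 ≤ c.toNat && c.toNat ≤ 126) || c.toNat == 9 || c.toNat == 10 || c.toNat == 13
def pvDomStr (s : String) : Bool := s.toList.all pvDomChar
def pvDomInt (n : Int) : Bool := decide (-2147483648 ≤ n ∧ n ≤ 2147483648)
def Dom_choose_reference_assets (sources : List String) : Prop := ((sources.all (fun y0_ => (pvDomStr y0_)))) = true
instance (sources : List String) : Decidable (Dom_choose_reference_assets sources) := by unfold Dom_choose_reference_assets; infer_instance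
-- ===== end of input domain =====

-- B replaces A's build-scored-list / max / filter structure by a single pass that
-- maintains the running best score and the set of sources achieving it (alternative decomposition, same cost).


-- ===== PORT A =====
-- loop body of A: score the source sequentially, append (score, src) when score > 0
def crfStepA (acc : List (Int × String)) (src : String) : List (Int × String) :=
  let score : Int := 0
  let lower := PySem.Str.lower src
  let score := if PySem.Str.isIn "pine_script_reference" lower then score + 10 else score
  let score := if PySem.Str.isIn "reference" lower then score + 5 else score
  let score := if PySem.Str.isIn "pine" lower then score + 3 else score
  if score > 0 then acc ++ [(score, src)] else acc

def choose_reference_assets (sources : List String) : List String :=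
  let scored := sources.foldl crfStepA []
  if scored.isEmpty then
    PySem.List.sorted (PySem.Set.ofList sources) (fun x => x) false
  else
    -- max(score for score, _ in scored): scored is nonempty here, so max? is some
    let top := (PySem.List.max? (scored.map Prod.fst) (fun x => x)).getD 0
    PySem.List.sorted
      (PySem.Set.ofList ((scored.filter (fun p => p.1 == top)).map Prod.snd))
      (fun x => x) false

-- ===== PORT B =====
-- B's score: one arithmetic expression from the same three keyword checks
def crfScore (src : String) : Int :=
  let lower := PySem.Str.lower src
  (if PySem.Str.isIn "pine_script_reference" lower then (10 : Int) else 0)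
  + (if PySem.Str.isIn "reference" lower then (5 : Int) else 0)
  + (if PySem.Str.isIn "pine" lower then (3 : Int) else 0)

-- loop body of B: running best score and the set of sources achieving it
def crfStepB (st : Int × PySem.Set String) (src : String) : Int × PySem.Set String :=
  let s := crfScore src
  if s > st.1 then (s, PySem.Set.ofList [src])
  else if s == st.1 && decide (s > 0) then (st.1, PySem.Set.add st.2 src)
  else st

def choose_reference_assets_alt (sources : List String) : List String :=
  let st := sources.foldl crfStepB (0, PySem.Set.empty)
  if st.2.isEmpty then PySem.List.sorted (PySem.Set.ofList sources) (fun x => x) false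
  else PySem.List.sorted st.2 (fun x => x) false

-- ===== PRECONDITION & SPEC =====
def Spec_choose_reference_assets (sources : List String) (out : List String) : Prop := out = choose_reference_assets_alt sources
instance (sources : List String) (out : List String) : Decidable (Spec_choose_reference_assets sources out) := by unfold Spec_choose_reference_assets; infer_instance

-- ===== CLAIM (what is proved, stated in full; the proofs are below) =====
def Claim_equal_choose_reference_assets : Prop := ∀ (sources : List String), Dom_choose_reference_assets sources → Spec_choose_reference_assets sources (choose_reference_assets sources)

-- ===== LEMMAS AND PROOFS =====

lemma crfScore_nonneg (src : String) : 0 ≤ crfScore src := by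
  unfold crfScore; dsimp only; split_ifs <;> simp

-- invariant relating A's scored list to B's running state
def crfInv (scored : List (Int × String)) (st : Int × PySem.Set String) : Prop :=
  (∀ p ∈ scored, 0 < p.1 ∧ p.1 ≤ st.1) ∧
  (scored = [] → st.1 = 0) ∧
  (scored ≠ [] → ∃ p ∈ scored, p.1 = st.1) ∧
  st.2 = PySem.Set.ofList ((scored.filter (fun p => p.1 == st.1)).map Prod.snd)

lemma crfInv_nonneg {scored st} (h : crfInv scored st) : 0 ≤ st.1 := by
  obtain ⟨hle, hemp, hex, _⟩ := h
  cases scored with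
  | nil => simp [hemp rfl]
  | cons a t =>
    obtain ⟨p, hp, hpe⟩ := hex (by simp)
    have := (hle p hp).1
    omega

lemma crfInv_step (scored : List (Int × String)) (st : Int × PySem.Set String)
    (src : String) (h : crfInv scored st) :
    crfInv (crfStepA scored src) (crfStepB st src) := by
  have hb0 : 0 ≤ st.1 := crfInv_nonneg h
  obtain ⟨hle, hemp, hex, hset⟩ := h
  have hc0 : 0 ≤ crfScore src := crfScore_nonneg src
  have hA : crfStepA scored src =
      if crfScore src > 0 then scored ++ [(crfScore src, src)] else scored := by
    unfold crfStepA crfScore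
    dsimp only
    split_ifs <;> simp_all
  unfold crfStepB
  set c := crfScore src with hc
  by_cases hgt : c > st.1
  · -- new strict maximum: B resets to {src}; A's filter keeps only the new entry
    have hcpos : c > 0 := by omega
    rw [hA]
    simp only [hgt, if_pos, hcpos]
    refine ⟨?_, ?_, ?_, ?_⟩
    · intro p hp
      rcases List.mem_append.mp hp with hp | hp
      · have := hle p hp; constructor
        · exact this.1
        · omega
      · simp at hp; simp [hp]; omega
    · intro hnil; simp at hnil
    · intro _; exact ⟨(c, src), by simp⟩
    · have hfilt : (scored ++ [(c, src)]).filter (fun p => p.1 == c) = [(c, src)] := by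
        rw [List.filter_append]
        have : scored.filter (fun p => p.1 == c) = [] := by
          rw [List.filter_eq_nil_iff]
          intro p hp
          have := (hle p hp).2
          simp only [beq_iff_eq]
          omega
        simp [this]
      simp [hfilt, PySem.Set.ofList]
  · -- c ≤ st.1
    by_cases heq : c = st.1 ∧ c > 0
    · -- tie with positive score: B adds src; A appends a top-score entry
      obtain ⟨hceq, hcpos⟩ := heq
      have hbr : (if c > st.1 then (c, PySem.Set.ofList [src])
          else if c == st.1 && decide (c > 0) then (st.1, PySem.Set.add st.2 src) else st)
          = (st.1, PySem.Set.add st.2 src) := by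
        rw [if_neg hgt, if_pos]
        simp only [Bool.and_eq_true, beq_iff_eq, decide_eq_true_eq]
        exact ⟨hceq, hcpos⟩
      rw [hbr, hA, if_pos hcpos]
      refine ⟨?_, ?_, ?_, ?_⟩
      · intro p hp
        rcases List.mem_append.mp hp with hp | hp
        · exact hle p hp
        · simp at hp; simp [hp]; omega
      · intro hnil; simp at hnil
      · intro _; exact ⟨(c, src), by simp, hceq⟩
      · rw [List.filter_append, List.map_append]
        have : ([(c, src)].filter (fun p => p.1 == st.1)) = [(c, src)] := by
          simp [hceq]
        rw [this]
        simp only [List.map_cons, List.map_nil]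
        rw [PySem.Set.ofList_append_singleton, ← hset]
    · -- no change to the best: B keeps st; A appends a below-top entry or nothing
      have hbranch :
          (if c > st.1 then (c, PySem.Set.ofList [src])
           else if c == st.1 && decide (c > 0) then (st.1, PySem.Set.add st.2 src) else st) = st := by
        rw [if_neg hgt, if_neg]
        simp only [Bool.and_eq_true, beq_iff_eq, decide_eq_true_eq]
        exact heq
      rw [hbranch, hA]
      by_cases hcpos : c > 0
      · -- 0 < c < st.1: A appends, the entry never reaches the top score
        have hlt : c < st.1 := by
          rcases lt_or_eq_of_le (le_of_not_gt hgt) with h | h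
          · exact h
          · exact absurd ⟨by exact_mod_cast h, hcpos⟩ heq
        rw [if_pos hcpos]
        refine ⟨?_, ?_, ?_, ?_⟩
        · intro p hp
          rcases List.mem_append.mp hp with hp | hp
          · exact hle p hp
          · simp at hp; simp [hp]; omega
        · intro hnil; simp at hnil
        · intro _
          have hb : 0 < st.1 := by omega
          have hne : scored ≠ [] := by
            intro hnil; rw [hemp hnil] at hb; omega
          obtain ⟨p, hp, hpe⟩ := hex hne
          exact ⟨p, List.mem_append.mpr (Or.inl hp), hpe⟩
        · rw [List.filter_append]
          have : ([(c, src)].filter (fun p => p.1 == st.1)) = [] := by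
            simp; omega
          rw [this, List.append_nil]
          exact hset
      · -- c = 0: neither side changes
        rw [if_neg hcpos]
        exact ⟨hle, hemp, hex, hset⟩

lemma crfInv_foldl (sources : List String) :
    ∀ scored st, crfInv scored st →
      crfInv (sources.foldl crfStepA scored) (sources.foldl crfStepB st) := by
  induction sources with
  | nil => intro scored st h; exact h
  | cons src rest ih =>
    intro scored st h
    simp only [List.foldl_cons]
    exact ih _ _ (crfInv_step scored st src h)

lemma crfInv_init : crfInv [] (0, PySem.Set.empty) := by
  refine ⟨by simp, fun _ => rfl, by simp, by simp [PySem.Set.ofList, PySem.Set.empty]⟩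

-- ===== VERDICT (by name: the statement is the Claim_ definition above) =====
theorem choose_reference_assets_spec : Claim_equal_choose_reference_assets := by
  intro sources _
  unfold Spec_choose_reference_assets choose_reference_assets choose_reference_assets_alt
  have h := crfInv_foldl sources [] (0, PySem.Set.empty) crfInv_init
  set scored := sources.foldl crfStepA [] with hscored
  set st := sources.foldl crfStepB (0, PySem.Set.empty) with hst
  obtain ⟨hle, hemp, hex, hset⟩ := h
  by_cases hnil : scored = []
  · -- nothing scored: both fall back to sorted(set(sources))
    have : st.2 = [] := by rw [hset, hnil]; rfl
    simp [hnil, this]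
  · -- B's set is exactly A's top-score set, and it is nonempty
    obtain ⟨p, hp, hpe⟩ := hex hnil
    -- the max over scored's scores is st.1
    have hmax : (PySem.List.max? (scored.map Prod.fst) (fun x => x)).getD 0 = st.1 := by
      obtain ⟨m, hm⟩ : ∃ m, PySem.List.max? (scored.map Prod.fst) (fun x => x) = some m := by
        cases hcase : PySem.List.max? (scored.map Prod.fst) (fun x => x) with
        | none =>
          rw [PySem.List.max?_eq_none_iff] at hcase
          simp only [List.map_eq_nil_iff] at hcase
          exact absurd hcase hnil
        | some m => exact ⟨m, rfl⟩
      have hmem := PySem.List.max?_mem hm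
      have hismax := PySem.List.max?_isMax hm
      obtain ⟨q, hq, hqe⟩ := List.mem_map.mp hmem
      have h1 : m ≤ st.1 := hqe ▸ (hle q hq).2
      have h2 : st.1 ≤ m := hismax st.1 (List.mem_map.mpr ⟨p, hp, hpe⟩)
      rw [hm]
      simp; omega
    have hne2 : st.2 ≠ [] := by
      rw [hset]
      intro habs
      have : p.2 ∈ PySem.Set.ofList ((scored.filter (fun q => q.1 == st.1)).map Prod.snd) := by
        rw [PySem.Set.mem_ofList]
        exact List.mem_map.mpr ⟨p, List.mem_filter.mpr ⟨hp, by simp [hpe]⟩, rfl⟩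
      rw [habs] at this
      exact absurd this (List.not_mem_nil)
    have hEmptyA : scored.isEmpty = false := by simpa [List.isEmpty_iff] using hnil
    have hEmptyB : st.2.isEmpty = false := by
      cases hc : st.2 with
      | nil => exact absurd hc hne2
      | cons a t => rfl
    rw [hset] at hEmptyB
    simp [hEmptyA, hEmptyB, hmax, hset]
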